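-- pv_equiv track=rewrite | github.com/seolmiseon/together-kids-hackathon | server/llm_service/services/community_matching_service.py | _determine_parenting_stage
-- ===== SOURCE A (Python) =====
-- from typing import Dict, List, Optional
--
-- def _determine_parenting_stage(children_ages: List[Dict]) -> str:
--     """자녀 연령대를 기반으로 육아 단계 결정"""
--     if not children_ages:
--         return "예비부모"
--
--     # 가장 어린 자녀 기준으로 단계 결정
--     youngest_age = min([child.get('age_months', 0) for child in children_ages])
--
--     if youngest_age <= 6:
--         return "영유아기_신생아"
--     elif youngest_age <= 18:
--         return "영유아기_영아"
--     elif youngest_age <= 24: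
--         return "영유아기_유아"
--     elif youngest_age <= 36:
--         return "유아기_3세"
--     elif youngest_age <= 60:
--         return "유아기_4_5세"
--     elif youngest_age <= 96:
--         return "아동기"
--     else:
--         return "학령기"
-- ===== SOURCE B (Python) =====
-- from typing import Dict, List, Optional
--
-- _BOUNDARIES = [6, 18, 24, 36, 60, 96]
-- _LABELS = ["영유아기_신생아", "영유아기_영아", "영유아기_유아",
--            "유아기_3세", "유아기_4_5세", "아동기", "학령기"]
--
-- def _determine_parenting_stage(children_ages: List[Dict]) -> str:
--     if not children_ages:
--         return "예비부모"
--     youngest_age = min(child.get('age_months', 0) for child in children_ages)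
--     # binary search (bisect_left): index = number of boundaries strictly below youngest_age
--     lo, hi = 0, len(_BOUNDARIES)
--     while lo < hi:
--         mid = (lo + hi) // 2
--         if _BOUNDARIES[mid] < youngest_age:
--             lo = mid + 1
--         else:
--             hi = mid
--     return _LABELS[lo]
-- ===== Notes on version B (the rewrite author's own statement) =====
-- stated objective: alternative
-- what changed: The if/elif cascade is replaced by a hand-written bisect_left binary search over a boundaries array whose result indexes a labels array.
import Mathlib
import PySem

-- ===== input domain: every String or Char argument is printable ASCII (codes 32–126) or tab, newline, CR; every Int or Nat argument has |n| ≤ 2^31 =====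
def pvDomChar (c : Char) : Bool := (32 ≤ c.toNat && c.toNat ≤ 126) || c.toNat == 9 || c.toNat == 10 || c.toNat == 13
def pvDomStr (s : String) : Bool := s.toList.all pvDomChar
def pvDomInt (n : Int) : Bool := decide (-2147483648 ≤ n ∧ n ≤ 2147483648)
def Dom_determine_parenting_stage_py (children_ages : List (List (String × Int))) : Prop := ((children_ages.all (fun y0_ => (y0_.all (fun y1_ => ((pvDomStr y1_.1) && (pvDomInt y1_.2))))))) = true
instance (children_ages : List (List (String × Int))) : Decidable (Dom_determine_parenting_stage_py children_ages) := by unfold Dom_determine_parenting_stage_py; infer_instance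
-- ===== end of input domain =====

-- B replaces A's if/elif cascade by a bisect_left binary search over a boundaries array indexing a labels array (alternative algorithm, same cost).
-- ===== PORT A =====
def determine_parenting_stage_py (children_ages : List (List (String × Int))) : String :=
  if children_ages = [] then "예비부모"
  else
    let youngest_age : Int :=
      (PySem.List.min? (children_ages.map (fun child => PySem.Dict.getD (PySem.Dict.mk child) "age_months" 0)) (fun x => x)).getD 0
    if youngest_age ≤ 6 then "영유아기_신생아"
    else if youngest_age ≤ 18 then "영유아기_영아"
    else if youngest_age ≤ 24 then "영유아기_유아"
    else if youngest_age ≤ 36 then "유아기_3세"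
    else if youngest_age ≤ 60 then "유아기_4_5세"
    else if youngest_age ≤ 96 then "아동기"
    else "학령기"

-- ===== PORT B =====
def pvBounds : List Int := [6, 18, 24, 36, 60, 96]
def pvLabels : List String :=
  ["영유아기_신생아", "영유아기_영아", "영유아기_유아", "유아기_3세", "유아기_4_5세", "아동기", "학령기"]

-- the while-loop of Source B; lo/hi indices are always in range, so getD never takes its default
def pvBisect (y : Int) (lo hi : Nat) : Nat :=
  if lo < hi then
    let mid := (lo + hi) / 2
    if pvBounds.getD mid 0 < y then pvBisect y (mid + 1) hi
    else pvBisect y lo mid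
  else lo
termination_by hi - lo
decreasing_by all_goals omega

def determine_parenting_stage_py_alt (children_ages : List (List (String × Int))) : String :=
  if children_ages = [] then "예비부모"
  else
    let youngest_age : Int :=
      (PySem.List.min? (children_ages.map (fun child => PySem.Dict.getD (PySem.Dict.mk child) "age_months" 0)) (fun x => x)).getD 0
    pvLabels.getD (pvBisect youngest_age 0 pvBounds.length) ""

-- ===== PRECONDITION & SPEC =====
def Spec_determine_parenting_stage_py (children_ages : List (List (String × Int))) (out : String) : Prop := out = determine_parenting_stage_py_alt children_ages
instance (children_ages : List (List (String × Int))) (out : String) : Decidable (Spec_determine_parenting_stage_py children_ages out) := by unfold Spec_determine_parenting_stage_py; infer_instance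

-- ===== CLAIM =====
def Claim_equal_determine_parenting_stage_py : Prop := ∀ (children_ages : List (List (String × Int))), Dom_determine_parenting_stage_py children_ages → Spec_determine_parenting_stage_py children_ages (determine_parenting_stage_py children_ages)

-- ===== LEMMAS AND PROOFS =====
theorem pvBisect_idx (y : Int) :
    pvBisect y 0 6 =
      (if y ≤ 6 then 0 else if y ≤ 18 then 1 else if y ≤ 24 then 2
       else if y ≤ 36 then 3 else if y ≤ 60 then 4 else if y ≤ 96 then 5 else 6) := by
  split_ifs <;>
    repeat' first
      | omega
      | split_ifs
      | (rw [pvBisect.eq_def]; norm_num [pvBounds])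

theorem pvBisect_eval (y : Int) :
    pvLabels.getD (pvBisect y 0 pvBounds.length) "" =
      (if y ≤ 6 then "영유아기_신생아"
       else if y ≤ 18 then "영유아기_영아"
       else if y ≤ 24 then "영유아기_유아"
       else if y ≤ 36 then "유아기_3세"
       else if y ≤ 60 then "유아기_4_5세"
       else if y ≤ 96 then "아동기"
       else "학령기") := by
  rw [show pvBounds.length = 6 from rfl, pvBisect_idx]
  split_ifs <;> rfl

-- ===== VERDICT =====
theorem determine_parenting_stage_py_spec : Claim_equal_determine_parenting_stage_py := by
  intro children_ages _
  unfold Spec_determine_parenting_stage_py determine_parenting_stage_py determine_parenting_stage_py_alt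
  by_cases h : children_ages = [] <;> simp only [h, if_pos, ite_false, pvBisect_eval]
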